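-- pv_equiv track=rewrite | github.com/cybergis/rs-embed | src/rs_embed/embedders/onthefly_wildsat.py | _clean_state_key
-- ===== SOURCE A (Python) =====
-- def _clean_state_key(key: str) -> str:
--     k = str(key)
--     prefixes = ("module.", "satellite_model.", "model.")
--     changed = True
--     while changed:
--         changed = False
--         for p in prefixes:
--             if k.startswith(p):
--                 k = k[len(p) :]
--                 changed = True
--     return k
-- ===== SOURCE B (Python) =====
-- import re
--
-- _PREFIX_RUN = re.compile(r'^(?:module\.|satellite_model\.|model\.)+')
--
-- def _clean_state_key(key: str) -> str:
--     return _PREFIX_RUN.sub('', str(key))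
-- ===== Notes on version B (the rewrite author's own statement) =====
-- stated objective: idiomatic
-- what changed: Replaces the hand-written while/for loop with a changed flag by a single anchored regex substitution that removes the whole leading run of prefix tokens in one library call.
import Mathlib
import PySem

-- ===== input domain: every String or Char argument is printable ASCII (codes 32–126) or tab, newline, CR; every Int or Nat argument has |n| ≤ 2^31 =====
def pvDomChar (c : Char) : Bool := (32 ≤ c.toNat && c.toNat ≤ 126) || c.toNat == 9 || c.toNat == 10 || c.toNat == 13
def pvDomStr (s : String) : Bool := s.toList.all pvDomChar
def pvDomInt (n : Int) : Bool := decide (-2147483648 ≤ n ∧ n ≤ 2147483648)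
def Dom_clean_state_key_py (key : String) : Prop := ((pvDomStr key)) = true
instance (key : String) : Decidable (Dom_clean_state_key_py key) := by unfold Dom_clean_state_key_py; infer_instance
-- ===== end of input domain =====

-- B replaces A's while/for loop with a changed flag by one anchored regex substitution
-- that removes the whole leading run of prefix tokens (objective: idiomatic).


-- the three prefix tokens (A's tuple / the alternatives of B's regex)
def pvModule : List Char := ['m','o','d','u','l','e','.']
def pvSat : List Char := ['s','a','t','e','l','l','i','t','e','_','m','o','d','e','l','.']
def pvModel : List Char := ['m','o','d','e','l','.']
def pvPrefixes : List (List Char) := [pvModule, pvSat, pvModel]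

-- a matched prefix is no longer than the string (needed for termination of both ports)
lemma pv_sw_length_le (s p : List Char) (h : PySem.Chars.startswith s p = true) :
    p.length ≤ s.length := by
  rw [PySem.Chars.startswith_iff] at h
  exact h.length_le

-- ===== PORT A =====
-- body of 'for p in prefixes': strip p when it is a prefix and set the changed flag
def pvStepA (st : List Char × Bool) (p : List Char) : List Char × Bool :=
  if PySem.Chars.startswith st.1 p then (st.1.drop p.length, true) else st

-- needed by the termination proof of the while loop below: a round that set the flag shrank k
lemma pv_foldA_lt (k : List Char)
    (h : (List.foldl pvStepA (k, false) pvPrefixes).2 = true) :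
    (List.foldl pvStepA (k, false) pvPrefixes).1.length < k.length := by
  by_cases h1 : PySem.Chars.startswith k pvModule = true
  · have l1 := pv_sw_length_le _ _ h1
    by_cases h2 : PySem.Chars.startswith (k.drop pvModule.length) pvSat = true
    · have l2 := pv_sw_length_le _ _ h2
      by_cases h3 : PySem.Chars.startswith (k.drop (pvModule.length + pvSat.length)) pvModel = true
      · have e : (List.foldl pvStepA (k, false) pvPrefixes).1
            = k.drop (pvModule.length + pvSat.length + pvModel.length) := by
          simp [pvPrefixes, pvStepA, h1, h2, h3]
        rw [e]; simp [List.length_drop, pvModule, pvSat, pvModel] at *; omega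
      · have e : (List.foldl pvStepA (k, false) pvPrefixes).1
            = k.drop (pvModule.length + pvSat.length) := by
          simp [pvPrefixes, pvStepA, h1, h2, h3]
        rw [e]; simp [List.length_drop, pvModule, pvSat] at *; omega
    · by_cases h3 : PySem.Chars.startswith (k.drop pvModule.length) pvModel = true
      · have e : (List.foldl pvStepA (k, false) pvPrefixes).1
            = k.drop (pvModule.length + pvModel.length) := by
          simp [pvPrefixes, pvStepA, h1, h2, h3]
        rw [e]; simp [List.length_drop, pvModule, pvModel] at *; omega
      · have e : (List.foldl pvStepA (k, false) pvPrefixes).1 = k.drop pvModule.length := by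
          simp [pvPrefixes, pvStepA, h1, h2, h3]
        rw [e]; simp [List.length_drop, pvModule] at *; omega
  · by_cases h2 : PySem.Chars.startswith k pvSat = true
    · have l2 := pv_sw_length_le _ _ h2
      by_cases h3 : PySem.Chars.startswith (k.drop pvSat.length) pvModel = true
      · have e : (List.foldl pvStepA (k, false) pvPrefixes).1
            = k.drop (pvSat.length + pvModel.length) := by
          simp [pvPrefixes, pvStepA, h1, h2, h3]
        rw [e]; simp [List.length_drop, pvSat, pvModel] at *; omega
      · have e : (List.foldl pvStepA (k, false) pvPrefixes).1 = k.drop pvSat.length := by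
          simp [pvPrefixes, pvStepA, h1, h2, h3]
        rw [e]; simp [List.length_drop, pvSat] at *; omega
    · by_cases h3 : PySem.Chars.startswith k pvModel = true
      · have l3 := pv_sw_length_le _ _ h3
        have e : (List.foldl pvStepA (k, false) pvPrefixes).1 = k.drop pvModel.length := by
          simp [pvPrefixes, pvStepA, h1, h2, h3]
        rw [e]; simp [List.length_drop, pvModel] at *; omega
      · simp [pvPrefixes, pvStepA, h1, h2, h3] at h

-- 'while changed:' — run the for loop once, repeat while something changed
def pvLoopA (k : List Char) : List Char :=
  if h : (List.foldl pvStepA (k, false) pvPrefixes).2 = true then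
    pvLoopA (List.foldl pvStepA (k, false) pvPrefixes).1
  else (List.foldl pvStepA (k, false) pvPrefixes).1
termination_by k.length
decreasing_by exact pv_foldA_lt k h

def clean_state_key_py (key : String) : String := String.ofList (pvLoopA key.toList)

-- ===== PORT B =====
-- hand port of re.sub(r'^(?:module\.|satellite_model\.|model\.)+', '', key): greedily
-- consume alternatives of the anchored group from the front (alternation tried left to
-- right, '+' greedy), then return the rest; exact for this pattern
def pvStripRun (s : List Char) : List Char :=
  if h1 : PySem.Chars.startswith s pvModule = true then pvStripRun (s.drop pvModule.length)
  else if h2 : PySem.Chars.startswith s pvSat = true then pvStripRun (s.drop pvSat.length)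
  else if h3 : PySem.Chars.startswith s pvModel = true then pvStripRun (s.drop pvModel.length)
  else s
termination_by s.length
decreasing_by
  · have := pv_sw_length_le _ _ h1; simp [List.length_drop, pvModule] at *; omega
  · have := pv_sw_length_le _ _ h2; simp [List.length_drop, pvSat] at *; omega
  · have := pv_sw_length_le _ _ h3; simp [List.length_drop, pvModel] at *; omega

def clean_state_key_py_alt (key : String) : String := String.ofList (pvStripRun key.toList)

-- ===== PRECONDITION & SPEC =====
def Spec_clean_state_key_py (key : String) (out : String) : Prop := out = clean_state_key_py_alt key
instance (key : String) (out : String) : Decidable (Spec_clean_state_key_py key out) := by unfold Spec_clean_state_key_py; infer_instance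

-- ===== CLAIM (what is proved, stated in full; the proofs are below) =====
def Claim_equal_clean_state_key_py : Prop := ∀ (key : String), Dom_clean_state_key_py key → Spec_clean_state_key_py key (clean_state_key_py key)

-- ===== LEMMAS AND PROOFS =====

-- no token is a prefix of a string that starts with another token
lemma pv_sat_not_module (s : List Char) (h : PySem.Chars.startswith s pvSat = true) :
    PySem.Chars.startswith s pvModule = false := by
  rw [PySem.Chars.startswith_iff] at h
  obtain ⟨t, rfl⟩ := h
  simp [PySem.Chars.startswith, pvSat, pvModule, List.isPrefixOf]

lemma pv_model_not_module (s : List Char) (h : PySem.Chars.startswith s pvModel = true) :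
    PySem.Chars.startswith s pvModule = false := by
  rw [PySem.Chars.startswith_iff] at h
  obtain ⟨t, rfl⟩ := h
  simp [PySem.Chars.startswith, pvModel, pvModule, List.isPrefixOf]

lemma pv_model_not_sat (s : List Char) (h : PySem.Chars.startswith s pvModel = true) :
    PySem.Chars.startswith s pvSat = false := by
  rw [PySem.Chars.startswith_iff] at h
  obtain ⟨t, rfl⟩ := h
  simp [PySem.Chars.startswith, pvModel, pvSat, List.isPrefixOf]

-- pvStripRun is invariant under stripping any one matching token
lemma pv_strip_module (s : List Char) (h : PySem.Chars.startswith s pvModule = true) :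
    pvStripRun s = pvStripRun (s.drop pvModule.length) := by
  rw [pvStripRun]; simp [h]

lemma pv_strip_sat (s : List Char) (h : PySem.Chars.startswith s pvSat = true) :
    pvStripRun s = pvStripRun (s.drop pvSat.length) := by
  rw [pvStripRun]; simp [h, pv_sat_not_module s h]

lemma pv_strip_model (s : List Char) (h : PySem.Chars.startswith s pvModel = true) :
    pvStripRun s = pvStripRun (s.drop pvModel.length) := by
  rw [pvStripRun]; simp [h, pv_model_not_module s h, pv_model_not_sat s h]

-- one round of A's for loop: either nothing matched (state unchanged, flag still false),
-- or the flag is set and pvStripRun agrees on the old and the new string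
lemma pv_foldA_char (s : List Char) :
    (List.foldl pvStepA (s, false) pvPrefixes = (s, false) ∧
      PySem.Chars.startswith s pvModule = false ∧
      PySem.Chars.startswith s pvSat = false ∧
      PySem.Chars.startswith s pvModel = false)
  ∨ ((List.foldl pvStepA (s, false) pvPrefixes).2 = true ∧
      pvStripRun (List.foldl pvStepA (s, false) pvPrefixes).1 = pvStripRun s) := by
  by_cases h1 : PySem.Chars.startswith s pvModule = true
  · by_cases h2 : PySem.Chars.startswith (s.drop pvModule.length) pvSat = true
    · by_cases h3 : PySem.Chars.startswith (s.drop (pvModule.length + pvSat.length)) pvModel = true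
      · refine Or.inr ⟨by simp [pvPrefixes, pvStepA, h1, h2, h3], ?_⟩
        have e : (List.foldl pvStepA (s, false) pvPrefixes).1
            = s.drop (pvModule.length + pvSat.length + pvModel.length) := by
          simp [pvPrefixes, pvStepA, h1, h2, h3]
        simp [e, pv_strip_module s h1, pv_strip_sat _ h2, pv_strip_model _ h3, List.drop_drop]
      · refine Or.inr ⟨by simp [pvPrefixes, pvStepA, h1, h2, h3], ?_⟩
        have e : (List.foldl pvStepA (s, false) pvPrefixes).1
            = s.drop (pvModule.length + pvSat.length) := by
          simp [pvPrefixes, pvStepA, h1, h2, h3]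
        simp [e, pv_strip_module s h1, pv_strip_sat _ h2, List.drop_drop]
    · by_cases h3 : PySem.Chars.startswith (s.drop pvModule.length) pvModel = true
      · refine Or.inr ⟨by simp [pvPrefixes, pvStepA, h1, h2, h3], ?_⟩
        have e : (List.foldl pvStepA (s, false) pvPrefixes).1
            = s.drop (pvModule.length + pvModel.length) := by
          simp [pvPrefixes, pvStepA, h1, h2, h3]
        simp [e, pv_strip_module s h1, pv_strip_model _ h3, List.drop_drop]
      · refine Or.inr ⟨by simp [pvPrefixes, pvStepA, h1, h2, h3], ?_⟩
        have e : (List.foldl pvStepA (s, false) pvPrefixes).1 = s.drop pvModule.length := by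
          simp [pvPrefixes, pvStepA, h1, h2, h3]
        simp [e, pv_strip_module s h1]
  · by_cases h2 : PySem.Chars.startswith s pvSat = true
    · by_cases h3 : PySem.Chars.startswith (s.drop pvSat.length) pvModel = true
      · refine Or.inr ⟨by simp [pvPrefixes, pvStepA, h1, h2, h3], ?_⟩
        have e : (List.foldl pvStepA (s, false) pvPrefixes).1
            = s.drop (pvSat.length + pvModel.length) := by
          simp [pvPrefixes, pvStepA, h1, h2, h3]
        simp [e, pv_strip_sat s h2, pv_strip_model _ h3, List.drop_drop]
      · refine Or.inr ⟨by simp [pvPrefixes, pvStepA, h1, h2, h3], ?_⟩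
        have e : (List.foldl pvStepA (s, false) pvPrefixes).1 = s.drop pvSat.length := by
          simp [pvPrefixes, pvStepA, h1, h2, h3]
        simp [e, pv_strip_sat s h2]
    · by_cases h3 : PySem.Chars.startswith s pvModel = true
      · refine Or.inr ⟨by simp [pvPrefixes, pvStepA, h1, h2, h3], ?_⟩
        have e : (List.foldl pvStepA (s, false) pvPrefixes).1 = s.drop pvModel.length := by
          simp [pvPrefixes, pvStepA, h1, h2, h3]
        simp [e, pv_strip_model s h3]
      · exact Or.inl ⟨by simp [pvPrefixes, pvStepA, h1, h2, h3], by simp [h1], by simp [h2], by simp [h3]⟩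

-- when no token matches, pvStripRun leaves the string alone
lemma pv_strip_none (s : List Char)
    (h1 : PySem.Chars.startswith s pvModule = false)
    (h2 : PySem.Chars.startswith s pvSat = false)
    (h3 : PySem.Chars.startswith s pvModel = false) :
    pvStripRun s = s := by
  rw [pvStripRun]; simp [h1, h2, h3]

-- the two loops compute the same string
lemma pv_loopA_eq_stripRun : ∀ (s : List Char), pvLoopA s = pvStripRun s := by
  have main : ∀ (n : Nat) (s : List Char), s.length < n → pvLoopA s = pvStripRun s := by
    intro n
    induction n with
    | zero => intro s hs; omega
    | succ n ih =>
      intro s hs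
      rw [pvLoopA]
      rcases pv_foldA_char s with ⟨heq, h1, h2, h3⟩ | ⟨hflag, hstrip⟩
      · rw [heq]
        simp [pv_strip_none s h1 h2 h3]
      · have hlt := pv_foldA_lt s hflag
        simp only [hflag, dif_pos]
        rw [ih _ (by omega), hstrip]
  exact fun s => main (s.length + 1) s (by omega)

-- ===== VERDICT (by name: the statement is the Claim_ definition above) =====
theorem clean_state_key_py_spec : Claim_equal_clean_state_key_py := by
  intro key _
  unfold Spec_clean_state_key_py clean_state_key_py clean_state_key_py_alt
  rw [pv_loopA_eq_stripRun]
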